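-- pv_equiv track=rewrite | github.com/Conan286/Python_PTIT | PY01018-MAHOA2.py | mahoa2
-- ===== SOURCE A (Python) =====
-- def rev(s):
--     ans = ""
--     for i in s:
--         ans = i+ans
--     return ans
--
-- def mahoa2(s,k):
--     ans = ""
--     for i in s:
--         if i=='.': v = 92 - 65
--         elif i=='_': v = 91 - 65
--         else:
--             v = ord(i)-65
--         v += k
--         v %= 28
--         if v<26: ans += chr(v+65)
--         elif v==26: ans += "_"
--         elif v==27: ans += "."
--     return rev(ans)
-- ===== SOURCE B (Python) =====
-- def mahoa2(s, k):
--     table = {}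
--     for c in set(s):
--         v = (27 if c == '.' else 26 if c == '_' else ord(c) - 65) + k
--         v %= 28
--         table[c] = '_' if v == 26 else '.' if v == 27 else chr(v + 65)
--     return ''.join(table[c] for c in s)[::-1]
-- ===== Notes on version B (the rewrite author's own statement) =====
-- stated objective: faster
-- what changed: B precomputes a substitution table (dict) over the distinct characters of s, applies it in one join pass, and reverses with slicing [::-1], replacing A's inline per-character branching loop with += string building plus a separate character-prepending rev helper (which is quadratic in CPython).
import Mathlib
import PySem

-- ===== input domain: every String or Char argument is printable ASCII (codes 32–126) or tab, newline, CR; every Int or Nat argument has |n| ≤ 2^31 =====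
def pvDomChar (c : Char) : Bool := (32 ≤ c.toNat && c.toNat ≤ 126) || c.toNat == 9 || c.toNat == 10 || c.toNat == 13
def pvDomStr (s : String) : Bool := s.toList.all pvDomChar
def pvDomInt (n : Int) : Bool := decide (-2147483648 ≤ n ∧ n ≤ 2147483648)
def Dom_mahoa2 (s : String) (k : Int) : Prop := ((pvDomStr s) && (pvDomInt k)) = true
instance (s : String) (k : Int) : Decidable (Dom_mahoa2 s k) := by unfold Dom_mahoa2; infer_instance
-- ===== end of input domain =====

-- B builds a substitution table over set(s) then applies it in one pass and reverses by slicing (idiomatic); A branches per character inline and reverses with a prepending helper. Return values proved equal on all inputs.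

-- ===== PORT A =====
-- rev(s): prepend each character
def pvRevA (l : List Char) : List Char :=
  l.foldl (fun ans i => i :: ans) []

def mahoa2 (s : String) (k : Int) : String :=
  let ans : List Char := s.toList.foldl (fun ans i =>
    let v : Int := if i = '.' then 92 - 65 else if i = '_' then 91 - 65 else (i.toNat : Int) - 65
    let v := v + k
    let v := PySem.Int.mod v 28
    if v < 26 then ans ++ [Char.ofNat (v + 65).toNat]
    else if v = 26 then ans ++ ['_']
    else if v = 27 then ans ++ ['.']
    else ans) []
  String.ofList (pvRevA ans)

-- ===== PORT B =====
def mahoa2_alt (s : String) (k : Int) : String :=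
  let table : PySem.Dict Char Char := (PySem.Set.ofList s.toList).foldl
    (fun d c =>
      let v := PySem.Int.mod ((if c = '.' then 27 else if c = '_' then 26 else (c.toNat : Int) - 65) + k) 28
      d.insert c (if v = 26 then '_' else if v = 27 then '.' else Char.ofNat (v + 65).toNat))
    PySem.Dict.empty
  -- ''.join(table[c] for c in s): every c of s is a key of table, so getD never falls back
  let enc : List Char := s.toList.map (fun c => (table.get? c).getD 'A')
  ((PySem.Str.slice? (String.ofList enc) none none (-1)).getD "")

-- ===== PRECONDITION & SPEC =====
def Spec_mahoa2 (s : String) (k : Int) (out : String) : Prop := out = mahoa2_alt s k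
instance (s : String) (k : Int) (out : String) : Decidable (Spec_mahoa2 s k out) := by unfold Spec_mahoa2; infer_instance

-- ===== CLAIM (what is proved, stated in full; the proofs are below) =====
def Claim_equal_mahoa2 : Prop := ∀ (s : String) (k : Int), Dom_mahoa2 s k → Spec_mahoa2 s k (mahoa2 s k)

-- ===== LEMMAS AND PROOFS =====

-- the common per-character cipher value
def pvEnc (k : Int) (c : Char) : Char :=
  let v := PySem.Int.mod ((if c = '.' then 27 else if c = '_' then 26 else (c.toNat : Int) - 65) + k) 28
  if v = 26 then '_' else if v = 27 then '.' else Char.ofNat (v + 65).toNat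

theorem pvMod28_bounds (a : Int) : 0 ≤ PySem.Int.mod a 28 ∧ PySem.Int.mod a 28 < 28 := by
  rw [PySem.Int.mod_eq_emod_of_pos (a := a) (b := 28) (by omega)]
  exact ⟨Int.emod_nonneg a (by omega), Int.emod_lt_of_pos a (by omega)⟩

-- A's loop body appends exactly [pvEnc k i]
theorem pvStepA_eq (ans : List Char) (i : Char) (k : Int) :
    (let v : Int := if i = '.' then 92 - 65 else if i = '_' then 91 - 65 else (i.toNat : Int) - 65
     let v := v + k
     let v := PySem.Int.mod v 28
     if v < 26 then ans ++ [Char.ofNat (v + 65).toNat]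
     else if v = 26 then ans ++ ['_']
     else if v = 27 then ans ++ ['.']
     else ans) = ans ++ [pvEnc k i] := by
  simp only [pvEnc]
  have hb := pvMod28_bounds ((if i = '.' then 27 else if i = '_' then 26 else (i.toNat : Int) - 65) + k)
  have h27 : ((92:Int) - 65) = 27 := by norm_num
  have h26 : ((91:Int) - 65) = 26 := by norm_num
  rw [h27, h26]
  set v := PySem.Int.mod ((if i = '.' then 27 else if i = '_' then 26 else (i.toNat : Int) - 65) + k) 28 with hv
  by_cases hlt : v < 26
  · simp [hlt, show v ≠ 26 by omega, show v ≠ 27 by omega]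
  · by_cases he : v = 26
    · simp [he]
    · have : v = 27 := by omega
      simp [this]

theorem pvFoldA (l : List Char) (k : Int) (acc : List Char) :
    l.foldl (fun ans i =>
      let v : Int := if i = '.' then 92 - 65 else if i = '_' then 91 - 65 else (i.toNat : Int) - 65
      let v := v + k
      let v := PySem.Int.mod v 28
      if v < 26 then ans ++ [Char.ofNat (v + 65).toNat]
      else if v = 26 then ans ++ ['_']
      else if v = 27 then ans ++ ['.']
      else ans) acc = acc ++ l.map (pvEnc k) := by
  induction l generalizing acc with
  | nil => simp
  | cons a l ih =>
    simp only [List.foldl_cons, List.map_cons]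
    rw [pvStepA_eq, ih]
    simp

theorem pvRevA_eq (l : List Char) : pvRevA l = l.reverse := by
  unfold pvRevA
  have h : ∀ (l acc : List Char), l.foldl (fun ans i => i :: ans) acc = l.reverse ++ acc := by
    intro l; induction l with
    | nil => simp
    | cons a l ih => intro acc; simp [ih]
  simp [h l]

-- the table built by the fold answers pvEnc k c on every key of the source list
theorem pvTable_get (l : List Char) (f : Char → Char) (d : PySem.Dict Char Char) (c : Char) :
    (l.foldl (fun d c => d.insert c (f c)) d).get? c
      = if c ∈ l then some (f c) else d.get? c := by
  induction l generalizing d with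
  | nil => simp
  | cons a l ih =>
    simp only [List.foldl_cons]
    rw [ih]
    by_cases hl : c ∈ l
    · simp [hl]
    · by_cases ha : c = a
      · subst ha; simp [hl, PySem.Dict.get?_insert_self]
      · simp [hl, ha, PySem.Dict.get?_insert_of_ne _ _ ha]

-- ===== VERDICT (by name: the statement is the Claim_ definition above) =====
theorem mahoa2_spec : Claim_equal_mahoa2 := by
  intro s k _
  show mahoa2 s k = mahoa2_alt s k
  unfold mahoa2 mahoa2_alt
  simp only []
  rw [pvFoldA, pvRevA_eq, PySem.Str.slice?_none_none_neg_one]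
  simp only [List.nil_append, Option.getD_some]
  congr 1
  have henc : s.toList.map (fun c =>
      (((PySem.Set.ofList s.toList).foldl (fun d c =>
        let v := PySem.Int.mod ((if c = '.' then 27 else if c = '_' then 26 else (c.toNat : Int) - 65) + k) 28
        d.insert c (if v = 26 then '_' else if v = 27 then '.' else Char.ofNat (v + 65).toNat))
        (PySem.Dict.empty : PySem.Dict Char Char)).get? c).getD 'A') = s.toList.map (pvEnc k) := by
    apply List.map_congr_left
    intro c hc
    have hfun : (fun (d : PySem.Dict Char Char) (c : Char) =>
        let v := PySem.Int.mod ((if c = '.' then 27 else if c = '_' then 26 else (c.toNat : Int) - 65) + k) 28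
        d.insert c (if v = 26 then '_' else if v = 27 then '.' else Char.ofNat (v + 65).toNat))
        = fun (d : PySem.Dict Char Char) (c : Char) => d.insert c (pvEnc k c) := rfl
    rw [hfun, pvTable_get (PySem.Set.ofList s.toList) (pvEnc k) PySem.Dict.empty c]
    have : c ∈ PySem.Set.ofList s.toList := (PySem.Set.mem_ofList _ _).mpr hc
    simp [this]
  rw [henc]
  simp
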